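-- pv_equiv track=rewrite | github.com/alessandroliafook/P1 | unidade9/bebeu_menos/bebeu_menos.py | quem_bebeu_mais_menos
-- ===== SOURCE A (Python) =====
-- def consumo(dia, amigo):
-- 	consumo = 0
-- 	for j in range(len(dia)):
-- 		consumo += dia[j][amigo]
-- 	return consumo
--
-- def quem_bebeu_mais_menos(dia1, dia2):
-- 	maior_consumo = consumo(dia1, 0) + consumo(dia2, 0)
-- 	maior_consumidor = 1
-- 	menor_consumo = consumo(dia1, 0) + consumo(dia2, 0)
-- 	menor_consumidor = 1
--
-- 	for i in range(len(dia1[0])):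
-- 		if consumo(dia1, i) + consumo(dia2, i) > maior_consumo:
-- 			maior_consumo = consumo(dia1, i) + consumo(dia2, i)
-- 			maior_consumidor = i + 1
-- 		if consumo(dia1, i) + consumo(dia2, i) < menor_consumo:
-- 			menor_consumo = consumo(dia1, i) + consumo(dia2, i)
-- 			menor_consumidor = i + 1
-- 	return maior_consumidor, menor_consumidor
-- ===== SOURCE B (Python) =====
-- def soma_coluna(dia, i):
--     s = 0
--     for row in dia:
--         s += row[i]
--     return s
--
-- def quem_bebeu_mais_menos(dia1, dia2):
--     # stage 1: build the table of totals per friend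
--     totais = [soma_coluna(dia1, i) + soma_coluna(dia2, i) for i in range(len(dia1[0]))]
--     # stage 2: locate first max and first min in the table
--     maior = totais.index(max(totais))
--     menor = totais.index(min(totais))
--     return maior + 1, menor + 1
-- ===== Notes on version B (the rewrite author's own statement) =====
-- stated objective: simpler
-- what changed: Replaces the single tracking loop that recomputes column sums via consumo() up to six times per friend by two stages: build the totals table once, then locate the first max and first min with index(); first-occurrence tie-breaking is preserved.
import Mathlib
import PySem

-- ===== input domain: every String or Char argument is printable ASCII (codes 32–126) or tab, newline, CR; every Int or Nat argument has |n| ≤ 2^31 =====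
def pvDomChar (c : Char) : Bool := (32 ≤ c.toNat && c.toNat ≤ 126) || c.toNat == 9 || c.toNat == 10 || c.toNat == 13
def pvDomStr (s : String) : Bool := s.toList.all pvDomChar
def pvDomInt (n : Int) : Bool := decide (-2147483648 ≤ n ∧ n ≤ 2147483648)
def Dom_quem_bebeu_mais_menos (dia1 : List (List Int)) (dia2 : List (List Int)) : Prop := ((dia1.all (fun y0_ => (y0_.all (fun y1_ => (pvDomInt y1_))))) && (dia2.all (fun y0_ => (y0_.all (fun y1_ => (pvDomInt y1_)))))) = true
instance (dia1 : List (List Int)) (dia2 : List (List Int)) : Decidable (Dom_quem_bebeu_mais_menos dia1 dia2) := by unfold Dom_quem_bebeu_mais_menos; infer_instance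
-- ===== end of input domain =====

-- B replaces A's tracking loop (which re-sums each column up to six times) by two stages:
-- build the totals table once, then locate first max / first min in it.

-- ===== PORT A =====
def consumo (dia : List (List Int)) (amigo : Int) : Int :=
  (PySem.List.pyRange 0 (dia.length : Int) 1).foldl
    (fun c j => c + PySem.List.pyGetD (PySem.List.pyGetD dia j []) amigo 0) 0

def quem_bebeu_mais_menos (dia1 : List (List Int)) (dia2 : List (List Int)) : Int × Int :=
  let init := consumo dia1 0 + consumo dia2 0
  let s := (PySem.List.pyRange 0 (((PySem.List.pyGetD dia1 0 []).length : Int)) 1).foldl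
    (fun (s : (Int × Int) × (Int × Int)) i =>
      ((if consumo dia1 i + consumo dia2 i > s.1.1 then (consumo dia1 i + consumo dia2 i, i + 1) else s.1),
       (if consumo dia1 i + consumo dia2 i < s.2.1 then (consumo dia1 i + consumo dia2 i, i + 1) else s.2)))
    ((init, 1), (init, 1))
  (s.1.2, s.2.2)

-- ===== PORT B =====
def soma_coluna (dia : List (List Int)) (i : Int) : Int :=
  dia.foldl (fun s row => s + PySem.List.pyGetD row i 0) 0

def quem_bebeu_mais_menos_alt (dia1 : List (List Int)) (dia2 : List (List Int)) : Int × Int :=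
  let totais := (List.range (PySem.List.pyGetD dia1 0 []).length).map
    (fun (k : Nat) => soma_coluna dia1 (k : Int) + soma_coluna dia2 (k : Int))
  match PySem.List.max? totais (fun y => y), PySem.List.min? totais (fun y => y) with
  | some mx, some mn =>
      ((((PySem.List.index? totais mx).getD 0 : Nat) : Int) + 1,
       (((PySem.List.index? totais mn).getD 0 : Nat) : Int) + 1)
  | _, _ => (1, 1)   -- unreachable under Pre_ (totais nonempty); Python raises here

-- ===== PRECONDITION & SPEC =====
-- Pre_ is exactly where the Python A returns: dia1 and its first row nonempty and every row of
-- both days at least len(dia1[0]) long; otherwise A raises IndexError.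
def Pre_quem_bebeu_mais_menos (dia1 : List (List Int)) (dia2 : List (List Int)) : Prop :=
  dia1 ≠ [] ∧ dia1.getD 0 [] ≠ [] ∧
  (∀ row ∈ dia1, (dia1.getD 0 []).length ≤ row.length) ∧
  (∀ row ∈ dia2, (dia1.getD 0 []).length ≤ row.length)
instance (dia1 : List (List Int)) (dia2 : List (List Int)) : Decidable (Pre_quem_bebeu_mais_menos dia1 dia2) := by
  unfold Pre_quem_bebeu_mais_menos; infer_instance

def pvWitness_quem_bebeu_mais_menos : List (List Int) × List (List Int) := ([[1, 2]], [[3, 0]])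

def Spec_quem_bebeu_mais_menos (dia1 : List (List Int)) (dia2 : List (List Int)) (out : Int × Int) : Prop := out = quem_bebeu_mais_menos_alt dia1 dia2
instance (dia1 : List (List Int)) (dia2 : List (List Int)) (out : Int × Int) : Decidable (Spec_quem_bebeu_mais_menos dia1 dia2 out) := by unfold Spec_quem_bebeu_mais_menos; infer_instance

-- ===== CLAIM (what is proved, stated in full; the proofs are below) =====
def Claim_equal_quem_bebeu_mais_menos : Prop := ∀ (dia1 : List (List Int)) (dia2 : List (List Int)), Dom_quem_bebeu_mais_menos dia1 dia2 → Pre_quem_bebeu_mais_menos dia1 dia2 → Spec_quem_bebeu_mais_menos dia1 dia2 (quem_bebeu_mais_menos dia1 dia2)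

-- ===== LEMMAS AND PROOFS =====

-- consumo is the column sum, row by row
theorem consumo_eq_soma (dia : List (List Int)) (i : Int) :
    consumo dia i = soma_coluna dia i := by
  unfold consumo soma_coluna
  exact PySem.List.foldl_pyRange_zero_pyGetD' dia [] (fun c row => c + PySem.List.pyGetD row i 0) 0

-- a fold whose state is an independent pair splits into two folds
theorem foldl_pair {α β γ : Type} (l : List α) (f : β → α → β) (g : γ → α → γ) (b : β) (c : γ) :
    l.foldl (fun s x => (f s.1 x, g s.2 x)) (b, c) = (l.foldl f b, l.foldl g c) := by
  induction l generalizing b c with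
  | nil => rfl
  | cons x xs ih => simpa using ih (f b x) (g c x)

-- the running "best value / best index" state of A's loop, for a strict comparison
def track (t : Nat → Int) (better : Int → Int → Prop) [DecidableRel better] : Nat → Int × Nat
  | 0 => (t 0, 0)
  | k + 1 =>
      if better (t (k + 1)) (track t better k).1 then (t (k + 1), k + 1) else track t better k

theorem track_fold (t : Nat → Int) (better : Int → Int → Prop) [DecidableRel better]
    (hirr : ∀ x, ¬ better x x) (m : Nat) :
    (List.range (m + 1)).foldl
        (fun (s : Int × Int) k => if better (t k) s.1 then (t k, (k : Int) + 1) else s) (t 0, 1)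
      = ((track t better m).1, ((track t better m).2 : Int) + 1) := by
  induction m with
  | zero => simp [track, hirr (t 0)]
  | succ m ih =>
      rw [List.range_succ, List.foldl_append, ih]
      simp only [List.foldl_cons, List.foldl_nil, track]
      split <;> simp

theorem track_idx_le (t : Nat → Int) (better : Int → Int → Prop) [DecidableRel better] (m : Nat) :
    (track t better m).2 ≤ m := by
  induction m with
  | zero => simp [track]
  | succ m ih => unfold track; split <;> omega

theorem track_val (t : Nat → Int) (better : Int → Int → Prop) [DecidableRel better] (m : Nat) :
    (track t better m).1 = t (track t better m).2 := by
  induction m with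
  | zero => simp [track]
  | succ m ih => unfold track; split <;> simp [ih]

theorem track_not_better (t : Nat → Int) (better : Int → Int → Prop) [DecidableRel better]
    (hirr : ∀ x, ¬ better x x)
    (hstep : ∀ a b c, ¬ better a c → better b c → ¬ better a b)
    (m : Nat) : ∀ k ≤ m, ¬ better (t k) (track t better m).1 := by
  induction m with
  | zero => intro k hk; interval_cases k; simpa [track] using hirr (t 0)
  | succ m ih =>
      intro k hk
      unfold track
      split
      · rename_i h
        rcases Nat.lt_or_ge k (m + 1) with hlt | hge
        · exact hstep _ _ _ (ih k (by omega)) h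
        · have : k = m + 1 := by omega
          subst this; exact hirr _
      · rename_i h
        rcases Nat.lt_or_ge k (m + 1) with hlt | hge
        · exact ih k (by omega)
        · have : k = m + 1 := by omega
          subst this; exact h

theorem track_first (t : Nat → Int) (better : Int → Int → Prop) [DecidableRel better]
    (hirr : ∀ x, ¬ better x x)
    (hstep : ∀ a b c, ¬ better a c → better b c → ¬ better a b)
    (hmix : ∀ a b c, better a b → ¬ better c b → better a c)
    (m : Nat) : ∀ k < (track t better m).2, better (track t better m).1 (t k) := by
  induction m with
  | zero => intro k hk; simp [track] at hk
  | succ m ih =>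
      intro k hk
      unfold track at hk ⊢
      split at hk
      · rename_i h
        simp only at hk ⊢
        rw [if_pos h]
        exact hmix _ _ _ h (track_not_better t better hirr hstep m k (by omega))
      · rename_i h
        rw [if_neg h]
        exact ih k hk

-- first-occurrence characterisation of list.index
theorem index?_of_first (L : List Int) (v : Int) :
    ∀ (k : Nat) (hk : k < L.length), L[k] = v → (∀ j (hj : j < k), L[j] ≠ v) →
      PySem.List.index? L v = some k := by
  induction L with
  | nil => intro k hk; simp at hk
  | cons x xs ih =>
      intro k hk hv hfirst
      cases k with
      | zero => simp at hv; subst hv; exact PySem.List.index?_cons_self x xs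
      | succ k =>
          have hx : x ≠ v := by simpa using hfirst 0 (by omega)
          rw [PySem.List.index?_cons_of_ne xs hx,
            ih k (by simpa using hk) (by simpa using hv)
              (fun j hj => by simpa using hfirst (j + 1) (by omega))]
          rfl

-- the whole story for one comparison direction: A's tracked index is B's index-of-extremum
theorem track_main (t : Nat → Int) (better : Int → Int → Prop) [DecidableRel better]
    (hirr : ∀ x, ¬ better x x)
    (hstep : ∀ a b c, ¬ better a c → better b c → ¬ better a b)
    (hmix : ∀ a b c, better a b → ¬ better c b → better a c)
    (hconn : ∀ a b, ¬ better a b → ¬ better b a → a = b)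
    (m : Nat) (v : Int)
    (hv : v ∈ (List.range (m + 1)).map t)
    (hbest : ∀ y ∈ (List.range (m + 1)).map t, ¬ better y v) :
    v = (track t better m).1 ∧
    PySem.List.index? ((List.range (m + 1)).map t) v = some (track t better m).2 := by
  have hIle : (track t better m).2 ≤ m := track_idx_le t better m
  have hMmem : (track t better m).1 ∈ (List.range (m + 1)).map t := by
    rw [track_val t better m]
    exact List.mem_map.2 ⟨(track t better m).2, List.mem_range.2 (by omega), rfl⟩
  have hMv : ¬ better (track t better m).1 v := hbest _ hMmem
  rcases List.mem_map.1 hv with ⟨k, hk, hkv⟩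
  have hkm : k ≤ m := by have := List.mem_range.1 hk; omega
  have hvM : ¬ better v (track t better m).1 := by
    rw [← hkv]; exact track_not_better t better hirr hstep m k hkm
  have hEq : v = (track t better m).1 := hconn _ _ hvM hMv
  have hlen : (track t better m).2 < ((List.range (m + 1)).map t).length := by
    simp; omega
  refine ⟨hEq, ?_⟩
  rw [hEq]
  refine index?_of_first _ _ (track t better m).2 hlen ?_ ?_
  · rw [List.getElem_map, List.getElem_range]
    exact (track_val t better m).symm
  · intro j hj
    rw [List.getElem_map, List.getElem_range]
    intro hjv
    have := track_first t better hirr hstep hmix m j hj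
    rw [hjv] at this
    exact hirr _ this

-- ===== VERDICT (by name: the statement is the Claim_ definition above) =====
theorem quem_bebeu_mais_menos_spec : Claim_equal_quem_bebeu_mais_menos := by
  intro dia1 dia2 _ hpre
  obtain ⟨h1, h2, h3, h4⟩ := hpre
  obtain ⟨m, hm⟩ : ∃ m, (dia1.getD 0 []).length = m + 1 := by
    refine ⟨(dia1.getD 0 []).length - 1, ?_⟩
    have : (dia1.getD 0 []).length ≠ 0 := by simpa using h2
    omega
  -- the totals function and table
  have hirr_gt : ∀ x : Int, ¬ ((fun a b : Int => a > b) x x) := by intro x; omega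
  have hstep_gt : ∀ a b c : Int, ¬ ((fun a b : Int => a > b) a c) → ((fun a b : Int => a > b) b c) →
      ¬ ((fun a b : Int => a > b) a b) := by intro a b c hac hbc; simp at *; omega
  have hmix_gt : ∀ a b c : Int, ((fun a b : Int => a > b) a b) → ¬ ((fun a b : Int => a > b) c b) →
      ((fun a b : Int => a > b) a c) := by intro a b c hab hcb; simp at *; omega
  have hconn_gt : ∀ a b : Int, ¬ ((fun a b : Int => a > b) a b) → ¬ ((fun a b : Int => a > b) b a) →
      a = b := by intro a b hab hba; simp at *; omega
  have hirr_lt : ∀ x : Int, ¬ ((fun a b : Int => a < b) x x) := by intro x; omega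
  have hstep_lt : ∀ a b c : Int, ¬ ((fun a b : Int => a < b) a c) → ((fun a b : Int => a < b) b c) →
      ¬ ((fun a b : Int => a < b) a b) := by intro a b c hac hbc; simp at *; omega
  have hmix_lt : ∀ a b c : Int, ((fun a b : Int => a < b) a b) → ¬ ((fun a b : Int => a < b) c b) →
      ((fun a b : Int => a < b) a c) := by intro a b c hab hcb; simp at *; omega
  have hconn_lt : ∀ a b : Int, ¬ ((fun a b : Int => a < b) a b) → ¬ ((fun a b : Int => a < b) b a) →
      a = b := by intro a b hab hba; simp at *; omega
  have trFoldMax := track_fold (fun k : Nat => soma_coluna dia1 (k : Int) + soma_coluna dia2 (k : Int))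
    (fun a b : Int => a > b) hirr_gt m
  have trFoldMin := track_fold (fun k : Nat => soma_coluna dia1 (k : Int) + soma_coluna dia2 (k : Int))
    (fun a b : Int => a < b) hirr_lt m
  simp only [Nat.cast_zero] at trFoldMax trFoldMin
  -- the A side
  have hA : quem_bebeu_mais_menos dia1 dia2 =
      ((((track (fun k : Nat => soma_coluna dia1 (k : Int) + soma_coluna dia2 (k : Int))
          (fun a b : Int => a > b) m).2 : Int) + 1),
       (((track (fun k : Nat => soma_coluna dia1 (k : Int) + soma_coluna dia2 (k : Int))
          (fun a b : Int => a < b) m).2 : Int) + 1)) := by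
    unfold quem_bebeu_mais_menos
    simp only [consumo_eq_soma, PySem.List.pyGetD_zero, hm, PySem.List.pyRange_zero_natCast,
      List.foldl_map]
    rw [foldl_pair (List.range (m + 1))
      (fun (s : Int × Int) (k : Nat) =>
        if soma_coluna dia1 (k : Int) + soma_coluna dia2 (k : Int) > s.1 then
          (soma_coluna dia1 (k : Int) + soma_coluna dia2 (k : Int), (k : Int) + 1) else s)
      (fun (s : Int × Int) (k : Nat) =>
        if soma_coluna dia1 (k : Int) + soma_coluna dia2 (k : Int) < s.1 then
          (soma_coluna dia1 (k : Int) + soma_coluna dia2 (k : Int), (k : Int) + 1) else s)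
      (soma_coluna dia1 0 + soma_coluna dia2 0, 1) (soma_coluna dia1 0 + soma_coluna dia2 0, 1)]
    rw [trFoldMax, trFoldMin]
  -- the B side
  have hLne : (List.range (m + 1)).map
      (fun k : Nat => soma_coluna dia1 (k : Int) + soma_coluna dia2 (k : Int)) ≠ [] := by simp
  cases hmax : PySem.List.max? ((List.range (m + 1)).map
      (fun k : Nat => soma_coluna dia1 (k : Int) + soma_coluna dia2 (k : Int))) (fun y => y) with
  | none => exact absurd ((PySem.List.max?_eq_none_iff _ _).1 hmax) hLne
  | some mx =>
  cases hmin : PySem.List.min? ((List.range (m + 1)).map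
      (fun k : Nat => soma_coluna dia1 (k : Int) + soma_coluna dia2 (k : Int))) (fun y => y) with
  | none => exact absurd ((PySem.List.min?_eq_none_iff _ _).1 hmin) hLne
  | some mn =>
  obtain ⟨hmxv, hmxi⟩ := track_main
    (fun k : Nat => soma_coluna dia1 (k : Int) + soma_coluna dia2 (k : Int))
    (fun a b : Int => a > b) hirr_gt hstep_gt hmix_gt hconn_gt m mx
    (PySem.List.max?_mem hmax)
    (fun y hy => by have := PySem.List.max?_isMax hmax y hy; simp at this ⊢; omega)
  obtain ⟨hmnv, hmni⟩ := track_main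
    (fun k : Nat => soma_coluna dia1 (k : Int) + soma_coluna dia2 (k : Int))
    (fun a b : Int => a < b) hirr_lt hstep_lt hmix_lt hconn_lt m mn
    (PySem.List.min?_mem hmin)
    (fun y hy => by have := PySem.List.min?_isMin hmin y hy; simp at this ⊢; omega)
  have hB : quem_bebeu_mais_menos_alt dia1 dia2 =
      ((((track (fun k : Nat => soma_coluna dia1 (k : Int) + soma_coluna dia2 (k : Int))
          (fun a b : Int => a > b) m).2 : Int) + 1),
       (((track (fun k : Nat => soma_coluna dia1 (k : Int) + soma_coluna dia2 (k : Int))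
          (fun a b : Int => a < b) m).2 : Int) + 1)) := by
    unfold quem_bebeu_mais_menos_alt
    simp only [PySem.List.pyGetD_zero, hm, hmax, hmin, hmxi, hmni, Option.getD_some]
  unfold Spec_quem_bebeu_mais_menos
  rw [hA, hB]
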